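/-
  THE STUB `_start` OF THE BASE IMAGE, PROVED ONCE FOR EVERY PROGRAM (c/base/start.S, 13 instructions at 100000H: the same bytes in
  every program linked against the base image).

      Top.MainPre globals len v     what is known of the state at the entry of `prog_main` (105000H, a constant of the link script):
                                    the six argument registers, `len ≤ 1FF000H`, and the shadow layer after `run_ctors` — the
                                    registered globals, IN and OUT live, no protected frame, the clean stack ending at `rsp + 8` —,
                                    and the invariant of the EMPTY HEAP `Heap.empty 800000H C00000H` over that layer (`.heap`: a
                                    program without a heap does not look at it)
      Top.mainPre_heapPre           `MainPre` gives `HeapPre T (Heap.empty 800000H C00000H) (globals ++ initialObjs len) [] v`, the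
                                    common precondition of the heap's contracts (ProgX/Spec/Heap.lean): a program with a heap
                                    asks `HeapPre` in its `prog_main` contract and gets it here
      Top.mainPre_live_in / _out    IN (`len` bytes at 200000H) and OUT (300000H bytes at 400000H) are live objects of that layer
      Top.stub_reaches              THE THEOREM: for the runtime record `R` of a program on the base image (`R.sym = rtSym ctor`),
                                    the contract of `run_ctors` for `R`, and ANY contract `s len` of `prog_main` whose precondition
                                    follows from `MainPre` and whose frame fits the stack (`≤ FFFF8H`),
                                    `Top.StubReaches T L.exit R L._start.entry globals Lay μ u₀`

      Top.stub_reachesD             THE SAME FOR A PROGRAM THAT READS ITS IMAGE'S DATA (constant tables in .rodata / .data): one more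
                                    parameter `D : Mem → Prop`, stable under agreement on [100000H, 700000H) (`hD`); the statement is
                                    `Top.StubReachesD … D …` (one more hypothesis `D u.mem` of the start memory), and `prog_main`'s
                                    precondition may use `D v.mem` (`hpre`). `stub_reaches` is the instance `D := fun _ => True`. At the
                                    start state `D` is a closed fact about the file's bytes: `ProgX.Top.staysInCode_of_stubD`.

  HOW A PROGRAM USES IT (the toy: Toy/Spec/Proved/start.lean could be these five lines):
      refine ProgX.Base.Top.stub_reaches hLay hμ hcode Toy.Spec.rt rfl Toy.Globals.objs (by decide) (by decide) (by decide)
        (fun len => Toy.Spec.prog_main.spec (Toy.Globals.objs ++ initialObjs len) []) (fun _ => by decide) ?_ h_run_ctors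
        (fun len => h_prog_main _ _)
      intro len v hv      -- prog_main's precondition from `MainPre`: the program's own part

  WHY NO HYPOTHESIS ABOUT `s.writes`, AND WHY THE WALKER NEVER SEES AN ABSTRACT `s.frame`: the stub needs nothing of the memory
  after `prog_main` but the text (`Returned.code`) — its three stores go to literal addresses inside the layout. So the contract
  of `prog_main` is first weakened (`Calls.weaken`) to `Top.stubMainSpec` (`stubMainSpecD`: with `D`): pre = `MainPre`, post = `True`, frame = FFFF8H (all the
  stack there is below 7FFFF8H), one window `[0, 2^64)`. That Spec has `vspec` rules with numerals, and the walk is that of a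
  concrete program.
-/
import ProgX.Top
import ProgX.Base.Spec.Runtime
import ProgX.Spec.Heap
namespace ProgX.Base
open X86 X86.User Asan ProgX

set_option maxRecDepth 4000
set_option maxHeartbeats 4000000

/-- `prog_main`: the address the stub calls, a constant of the link script (the same in every image; `Symbols.prog_main`). -/
abbrev L.prog_main.entry : Word := 0x105000

/-! ### What `run_ctors` needs and leaves, for any descriptor table (these belong next to the definitions in Asan/Runtime.lean) -/

/-- The footprint of a registration lies in the shadow of the image (`Asan.registerWrites_shadow`, under the name the accepted
proofs cite). -/
theorem Top.registerWrites_shadow (descs : List GlobalDesc) (hok : ∀ d, d ∈ descs → d.OK) :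
    ∀ w, w ∈ registerWrites descs → 0xC00000 ≤ w.lo ∧ w.hi ≤ 0xC40000 :=
  Asan.registerWrites_shadow descs hok

/-- `.init_array` is still in a memory that agrees with the first one on the image's data (`Asan.CtorIn.of_eqOn`). -/
theorem Top.stub_ctorIn_eqOn {mem mem' : Mem} {S : RtSymbols} (h : CtorIn mem S) (he : Mem.EqOn 0x100000 0x700000 mem mem')
    (h1 : 0x100000 ≤ S.initArrayStart) (h2 : S.initArrayStart + 8 ≤ 0x700000) : CtorIn mem' S :=
  h.of_eqOn he h1 h2 (by decide)

/-- The descriptor table is still in a memory that agrees with the first one on the image's data (`Asan.DescsIn.of_eqOn`). -/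
theorem Top.stub_descsIn_eqOn {mem mem' : Mem} {table : Nat} {descs : List GlobalDesc} (h : DescsIn mem table descs)
    (he : Mem.EqOn 0x100000 0x700000 mem mem') (h1 : 0x100000 ≤ table) (h2 : table + 64 * descs.length ≤ 0x700000) :
    DescsIn mem' table descs :=
  h.of_eqOn he h1 h2 (by decide)

/-! ### The state at the entry of `prog_main` -/

/-- **What is known of the state at the entry of `prog_main`** when the stub calls it (RIP = 105000H is `AtEntry`'s): the six
parameter words in the argument registers — `in` = 200000H, `len`, `out` = 400000H, `cap` = 300000H, `heap` = 800000H,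
`heap_len` = 400000H —, `len ≤ 1FF000H`, the shadow clause for the registered globals, IN and OUT, no protected frame, and the
invariant of the EMPTY heap over the same objects (`heap`: the region [800000H, C00000H) is as in the start state — the control
cell reads 0, all of it is poisoned; a program without a heap ignores the field). -/
structure Top.MainPre (globals : List Obj) (len : Nat) (v : State) : Prop where
  rdi : v.reg .rdi = 0x200000
  rsi : v.reg .rsi = UInt64.ofNat len
  rdx : v.reg .rdx = 0x400000
  rcx : v.reg .rcx = 0x300000
  r8 : v.reg .r8 = 0x800000
  r9 : v.reg .r9 = 0x400000
  len_le : len ≤ 0x1FF000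
  shadow : ShadowPre (globals ++ initialObjs len) [] v
  heap : HeapInv (Heap.empty 0x800000 0xC00000) (globals ++ initialObjs len) [] ((v.reg .rsp).toNat + 8) v.mem

/-- The second argument as a number: the length of the input. -/
theorem Top.MainPre.rsi_toNat {globals : List Obj} {len : Nat} {v : State} (h : Top.MainPre globals len v) :
    (v.reg .rsi).toNat = len := by
  have hl := h.len_le
  rw [h.rsi, UInt64.toNat_ofNat']
  omega

/-- The input `IN` (`len` bytes at 200000H) is a live object at the entry of `prog_main`. -/
theorem Top.mainPre_live_in (globals : List Obj) (len : Nat) : LiveIn (globals ++ initialObjs len) [] 0x200000 len := by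
  refine ⟨objIN len, ?_, Nat.le_refl _, Nat.le_refl _⟩
  apply List.mem_append_right
  apply List.mem_append_right
  unfold initialObjs
  exact List.mem_cons_self

/-- Every range inside the output `OUT` (300000H bytes at 400000H) is live at the entry of `prog_main`. -/
theorem Top.mainPre_live_out (globals : List Obj) (len : Nat) (a n : Nat) (h1 : 0x400000 ≤ a) (h2 : a + n ≤ 0x700000) :
    LiveIn (globals ++ initialObjs len) [] a n := by
  refine ⟨objOUT, ?_, h1, h2⟩
  apply List.mem_append_right
  apply List.mem_append_right
  unfold initialObjs
  exact List.mem_cons_of_mem _ List.mem_cons_self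

/-- No live object at the entry of `prog_main` lies in the text window, if no registered global does (per program: `by decide`). -/
theorem Top.mainPre_offText (globals : List Obj) (len : Nat) (hoff : ∀ o, o ∈ globals → T.hi ≤ o.base) :
    ∀ o, o ∈ globals ++ initialObjs len → T.hi ≤ o.base := by
  intro o ho
  rcases List.mem_append.mp ho with hg | hi
  · exact hoff o hg
  · unfold initialObjs at hi
    simp only [List.mem_cons, List.not_mem_nil, or_false] at hi
    rcases hi with rfl | rfl
    · show T.hi ≤ 0x200000
      decide
    · show T.hi ≤ 0x400000
      decide

/-- **The common precondition of the heap's contracts** (ProgX/Spec/Heap.lean: `malloc.spec T H rest frames` …) at the entry of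
`prog_main`, for the EMPTY heap: a program with a heap states `HeapPre ProgX.Base.T (Heap.empty 0x800000 0xC00000) …` in the
precondition of its `prog_main` and discharges it in its `hpre` by this lemma. -/
theorem Top.mainPre_heapPre {globals : List Obj} {len : Nat} {v : State} (h : Top.MainPre globals len v) :
    ProgX.Spec.HeapPre T (Heap.empty 0x800000 0xC00000) (globals ++ initialObjs len) [] v where
  inv := h.heap
  base := rfl
  limit := rfl
  text := by decide
  offText := h.shadow.offText

/-- The objects of a sane descriptor table end below the heap region (in fact below 200000H): `stub_reaches`'s `hglobals_lo` for
`globals = (descs.map GlobalDesc.obj).reverse`, the form of every generated `Globals.objs` (or, per program: `by decide`). -/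
theorem Top.globals_below_heap (descs : List GlobalDesc) (hok : ∀ d, d ∈ descs → d.OK) :
    ∀ o, o ∈ (descs.map GlobalDesc.obj).reverse → o.base + o.size ≤ 0x800000 := by
  intro o ho
  obtain ⟨d, hd, rfl⟩ := List.mem_map.mp (List.mem_reverse.mp ho)
  obtain ⟨d1, d2, d3, d4, d5⟩ := hok d hd
  unfold GlobalDesc.obj
  simp only
  omega

/-- **The contract of `prog_main` as the stub uses it**: entered with `MainPre`, it returns; nothing else is asked of it. The
frame is all the stack below the stub's `call` (rsp = 7FFFF8H at the entry), the one window is the whole memory. -/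
def Top.stubMainSpec (globals : List Obj) (len : Nat) : Spec where
  pre := Top.MainPre globals len
  post _ _ := True
  frame := 0xFFFF8
  writes _ := [⟨0, 2 ^ 64⟩]

@[vspec] theorem Top.stubMainSpec_frame (globals : List Obj) (len : Nat) : (Top.stubMainSpec globals len).frame = 0xFFFF8 :=
  id rfl

@[vspec] theorem Top.stubMainSpec_writes (globals : List Obj) (len : Nat) (u : State) :
    (Top.stubMainSpec globals len).writes u = [⟨0, 2 ^ 64⟩] := id rfl

/-- Any contract of `prog_main` whose precondition follows from `MainPre` and whose frame fits the stack gives `stubMainSpec`. -/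
theorem Top.stubMainSpec_of {Lay : Layout} {μ : Microarch} {u₀ : State} {globals : List Obj} {len : Nat} {s : Spec}
    (hframe : s.frame ≤ 0xFFFF8) (hpre : ∀ v, Top.MainPre globals len v → s.pre v)
    (h : Calls Lay μ WayInv (conv u₀) L.prog_main.entry s) :
    Calls Lay μ WayInv (conv u₀) L.prog_main.entry (Top.stubMainSpec globals len) := by
  intro u ret he hp
  -- the frame: `s` asks for less stack
  have hroom : (conv u₀).stackLo + s.frame ≤ (u.reg .rsp).toNat :=
    Nat.le_trans (Nat.add_le_add_left hframe _) he.room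
  have he' : AtEntry (conv u₀) L.prog_main.entry s.frame ret u :=
    ⟨he.rip, he.retAddr, he.ret_lt, he.align, hroom, he.top, he.code, he.inv⟩
  refine (h u ret he' (hpre u hp)).mono ?_
  intro v hv
  refine ⟨hv.rip, hv.rsp, hv.saved, ?_, hv.code, hv.inv, True.intro⟩
  -- the footprint: no address lies outside the window `[0, 2^64)`, so nothing is claimed
  intro a ha
  have hwin := ha ⟨0, 2 ^ 64⟩ (List.mem_cons_of_mem _ List.mem_cons_self)
  have hlt := UInt64.toNat_lt a
  simp only at hwin
  omega

/-- `stubMainSpec` with the data clause: `prog_main` is entered with `MainPre` AND `D` of its memory (`Top.stub_reachesD`). -/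
def Top.stubMainSpecD (globals : List Obj) (len : Nat) (D : Mem → Prop) : Spec where
  pre v := Top.MainPre globals len v ∧ D v.mem
  post _ _ := True
  frame := 0xFFFF8
  writes _ := [⟨0, 2 ^ 64⟩]

@[vspec] theorem Top.stubMainSpecD_frame (globals : List Obj) (len : Nat) (D : Mem → Prop) :
    (Top.stubMainSpecD globals len D).frame = 0xFFFF8 := id rfl

@[vspec] theorem Top.stubMainSpecD_writes (globals : List Obj) (len : Nat) (D : Mem → Prop) (u : State) :
    (Top.stubMainSpecD globals len D).writes u = [⟨0, 2 ^ 64⟩] := id rfl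

/-- Any contract of `prog_main` whose precondition follows from `MainPre` and `D`, and whose frame fits the stack, gives
`stubMainSpecD`. -/
theorem Top.stubMainSpecD_of {Lay : Layout} {μ : Microarch} {u₀ : State} {globals : List Obj} {len : Nat} {D : Mem → Prop} {s : Spec}
    (hframe : s.frame ≤ 0xFFFF8) (hpre : ∀ v, Top.MainPre globals len v → D v.mem → s.pre v)
    (h : Calls Lay μ WayInv (conv u₀) L.prog_main.entry s) :
    Calls Lay μ WayInv (conv u₀) L.prog_main.entry (Top.stubMainSpecD globals len D) := by
  intro u ret he hp
  -- the frame: `s` asks for less stack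
  have hroom : (conv u₀).stackLo + s.frame ≤ (u.reg .rsp).toNat :=
    Nat.le_trans (Nat.add_le_add_left hframe _) he.room
  have he' : AtEntry (conv u₀) L.prog_main.entry s.frame ret u :=
    ⟨he.rip, he.retAddr, he.ret_lt, he.align, hroom, he.top, he.code, he.inv⟩
  refine (h u ret he' (hpre u hp.1 hp.2)).mono ?_
  intro v hv
  refine ⟨hv.rip, hv.rsp, hv.saved, ?_, hv.code, hv.inv, True.intro⟩
  -- the footprint: no address lies outside the window `[0, 2^64)`, so nothing is claimed
  intro a ha
  have hwin := ha ⟨0, 2 ^ 64⟩ (List.mem_cons_of_mem _ List.mem_cons_self)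
  have hlt := UInt64.toNat_lt a
  simp only at hwin
  omega

/-! ### The stub's walk -/

/-- **THE STUB `_start` REACHES `prog_exit`, FOR EVERY PROGRAM ON THE BASE IMAGE.** `R`: the program's runtime record (the base's
entry points with the program's constructor: `hR`; its descriptor table inside the image's data: `htable`); `globals`: the
objects of its registered globals, none in the text window (`hoff`), all below the heap region (`hglobals_lo`: `by decide`, or
`Top.globals_below_heap`); `s len`: the contract of its `prog_main` for an input of
`len` bytes (`h_main`), with a frame that fits the stack (`hframe`) and a precondition that follows from `Top.MainPre` (`hpre`:
the program's own part of the stub's proof). The walk: `call run_ctors` (0x100000; `.init_array` and the table are read in a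
memory that differs from the start memory by the pushed return address), the six parameter loads through run_ctors's footprint
(32 bytes of stack, shadow bytes), `call prog_main` (0x100035; `MainPre` from `StartOK.registered`; its `heap` field from `StartOK.heap_cell` / `.heap_poisoned`: up to there only
stack bytes below 800000H and shadow bytes of the image, below D00000H, were written), three unchecked stores at
literal addresses, RIP = `L.exit`. -/
theorem Top.stub_reachesD {Lay : Layout} (hLay : Lay.hi = 0x1000000) {μ : Microarch} (hμ : UserX.MicroOK μ) {u₀ : State}
    (hcode : HasCodeNat Lay u₀ L._start.entry Code.code__start.nat L._start.size)
    (R : Runtime) (hR : R.sym = Spec.rtSym R.sym.ctor) (globals : List Obj)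
    (hoff : ∀ o, o ∈ globals → T.hi ≤ o.base) (hglobals_lo : ∀ o, o ∈ globals → o.base + o.size ≤ 0x800000)
    (htable : 0x100000 ≤ R.table ∧ R.table + 64 * R.descs.length ≤ 0x700000)
    (D : Mem → Prop) (hD : ∀ m m', D m → Mem.EqOn 0x100000 0x700000 m m' → D m')
    (s : Nat → Spec) (hframe : ∀ len, (s len).frame ≤ 0xFFFF8)
    (hpre : ∀ len v, Top.MainPre globals len v → D v.mem → (s len).pre v)
    (h_run_ctors : Calls Lay μ WayInv (conv u₀) L.run_ctors.entry (runCtorsSpec R))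
    (h_main : ∀ len, Calls Lay μ WayInv (conv u₀) L.prog_main.entry (s len)) :
    Top.StubReachesD T L.exit R L._start.entry globals D Lay μ u₀ := by
  intro len u hst hD0 hco
  -- `.init_array` of the base image: the one slot at 141000H
  have e_init : R.sym.initArrayStart = 0x141000 := by
    rw [hR]
    rfl
  -- the start state's facts under the names the walker reads (there is no `AtEntry`: nothing called the stub)
  have w_rip : u.rip = L._start.entry := hst.rip
  have c_rsp : u.reg .rsp = 0x800000 := hst.rsp
  have w_eq : Mem.EqOn L.textLo L.textHi u₀.mem u.mem := hco
  have hdf : u.flags .df = false := (show abiInv _ from hst.inv).1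
  have hmx : u.mxcsr &&& 0x1F80 = 0x1F80 := (show abiInv _ from hst.inv).2
  have hsse := sseOK_of_abiInv hst.inv
  have w_kept : RegsKept [.rsp] u u := RegsKept.refl _ _
  -- the contract of `prog_main` in the form the walk uses: numerals for the frame and the window
  have hmain := Top.stubMainSpecD_of (globals := globals) (D := D) (hframe len) (hpre len) (h_main len)
  -- 0x100000: call run_ctors
  u_walk hcode [hμ.vendor] span [L.textLo, L.textHi] side (v_side)
  case call_inv =>
    v_inv
  case pre_100000 =>
    -- run_ctors reads `.init_array` and the descriptor table in the memory after the push of its return address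
    have hdata : Mem.EqOn 0x100000 0x700000 u.mem s_100000.mem := by
      rw [w_mem]
      exact Mem.EqOn.writeLE _ _ _ _ _ _ (by decide) (by decide)
    exact ⟨Top.stub_ctorIn_eqOn hst.ctor hdata (by omega) (by omega), Top.stub_descsIn_eqOn hst.descs hdata htable.1 htable.2,
      hst.descs_ok⟩
  -- 0x100005 (ret1): the state run_ctors returned
  v_after_call w_rsp_100000 w_mem_100000
  -- the image's data and the parameter block are off run_ctors's footprint (32 bytes of stack, shadow bytes)
  have hdataR : Mem.EqOn 0x100000 0x700000 u.mem s_100000r.mem := by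
    refine Mem.EqOn.step_same (Mem.EqOn.writeLE _ _ _ _ _ _ (by decide) (by decide)) w_same ?_
    intro w hw
    rcases List.mem_cons.mp hw with rfl | hw
    · left
      decide
    · have hshadow := Top.registerWrites_shadow _ hst.descs_ok w hw
      omega
  -- … and so are the heap region [800000H, C00000H) and its shadow [D00000H, D80000H) (the globals' shadow ends below C40000H)
  have hheapR : Mem.EqOn 0x800000 0xC00000 u.mem s_100000r.mem := by
    refine Mem.EqOn.step_same (Mem.EqOn.writeLE _ _ _ _ _ _ (by decide) (by decide)) w_same ?_
    intro w hw
    rcases List.mem_cons.mp hw with rfl | hw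
    · right
      decide
    · have hshadow := Top.registerWrites_shadow _ hst.descs_ok w hw
      omega
  have hheapShR : Mem.EqOn 0xD00000 0xD80000 u.mem s_100000r.mem := by
    refine Mem.EqOn.step_same (Mem.EqOn.writeLE _ _ _ _ _ _ (by decide) (by decide)) w_same ?_
    intro w hw
    rcases List.mem_cons.mp hw with rfl | hw
    · right
      decide
    · have hshadow := Top.registerWrites_shadow _ hst.descs_ok w hw
      omega
  have hshR : Mem.EqOn 0xC00000 0xE00000 u.mem s_100000.mem := by
    rw [w_mem_100000]
    exact Mem.EqOn.writeLE _ _ _ _ _ _ (by decide) (by decide)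
  have p_in : s_100000r.mem.readLE 0x1FF000 8 = 0x200000 := by
    rw [hdataR.readLE _ 8 (by decide) (by decide) (by decide)]
    exact hst.param_in
  have p_len : s_100000r.mem.readLE 0x1FF008 8 = len := by
    rw [hdataR.readLE _ 8 (by decide) (by decide) (by decide)]
    exact hst.param_len
  have p_out : s_100000r.mem.readLE 0x1FF010 8 = 0x400000 := by
    rw [hdataR.readLE _ 8 (by decide) (by decide) (by decide)]
    exact hst.param_out
  have p_cap : s_100000r.mem.readLE 0x1FF018 8 = 0x300000 := by
    rw [hdataR.readLE _ 8 (by decide) (by decide) (by decide)]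
    exact hst.param_cap
  have p_heap : s_100000r.mem.readLE 0x1FF030 8 = 0x800000 := by
    rw [hdataR.readLE _ 8 (by decide) (by decide) (by decide)]
    exact hst.param_heap
  have p_hlen : s_100000r.mem.readLE 0x1FF038 8 = 0x400000 := by
    rw [hdataR.readLE _ 8 (by decide) (by decide) (by decide)]
    exact hst.param_heap_len
  have hpostR : Mem.EqOn 0xC00000 0xE00000 (registerMem s_100000.mem R.descs) s_100000r.mem := w_post
  clear w_same w_post
  -- 0x100005 … 0x100035: the six parameter loads, call prog_main
  u_walk hcode [hμ.vendor] span [L.textLo, L.textHi] side (v_side)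
  case call_inv =>
    v_inv
  case pre_100035 =>
    -- the push of the return address went to the stack: off the shadow
    have hsh35 : Mem.EqOn 0xC00000 0xE00000 s_100000r.mem s_100035.mem := by
      rw [w_mem]
      exact Mem.EqOn.writeLE _ _ _ _ _ _ (by decide) (by decide)
    -- the shadow layer after the registration of the globals, the clean stack ending at 800000H = rsp + 8
    have hinv : ShadowInv (globals ++ initialObjs len) [] ((s_100035.reg .rsp).toNat + 8) s_100035.mem := by
      rw [w_rsp]
      exact hst.registered s_100000.mem s_100035.mem hshR (hpostR.trans hsh35)
    -- the heap region and its shadow are still the start state's: the push went to the stack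
    have hheap35 : Mem.EqOn 0x800000 0xC00000 u.mem s_100035.mem := by
      rw [w_mem]
      exact hheapR.step_writeLE _ _ _ (by decide) (by decide)
    have hheapSh35 : Mem.EqOn 0xD00000 0xD80000 u.mem s_100035.mem := by
      rw [w_mem]
      exact hheapShR.step_writeLE _ _ _ (by decide) (by decide)
    have hcell : s_100035.mem.readLE 0x800000 8 = 0 := by
      rw [hheap35.readLE _ 8 (by decide) (by decide) (by decide)]
      exact hst.heap_cell
    have hpois : ∀ g, 0x800000 / 8 ≤ g → g < 0xC00000 / 8 → 128 ≤ shadowOf s_100035.mem g := by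
      intro g hg1 hg2
      have e := shadowAddr_toNat g (by omega)
      have hsame : shadowOf s_100035.mem g = shadowOf u.mem g := by
        unfold shadowOf
        rw [hheapSh35 (shadowAddr g) (by omega) (by omega)]
      rw [hsame]
      exact hst.heap_poisoned g hg1 hg2
    -- no object of the layer lies in the heap region: the globals and IN, OUT end below it
    have hout : ∀ o, o ∈ globals ++ initialObjs len → o.base + o.size ≤ 0x800000 ∨ 0xC00000 ≤ o.base := by
      intro o ho
      rcases List.mem_append.mp ho with hg | hi
      · exact Or.inl (hglobals_lo o hg)
      · exact Top.initialObjs_off_heap len hst.len_le o hi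
    -- the image's data is still the start state's (run_ctors's footprint, then a stack store): `D` is carried here
    have hdata35 : Mem.EqOn 0x100000 0x700000 u.mem s_100035.mem := by
      rw [w_mem]
      exact hdataR.step_writeLE _ _ _ (by decide) (by decide)
    exact ⟨⟨w_rdi, w_rsi, w_rdx, w_rcx, w_r8, w_r9, hst.len_le, ⟨hinv, Top.mainPre_offText globals len hoff⟩,
      Top.heapInv_empty hinv hcell hpois hout⟩, hD _ _ hD0 hdata35⟩
  -- 0x10003a (ret2): the state prog_main returned; its result is any word, its footprint is not needed
  v_after_call w_rsp_100035 w_mem_100035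
  obtain ⟨z, w_rax⟩ : ∃ z, s_100035r.reg .rax = z := ⟨_, rfl⟩
  clear w_same w_post
  -- 0x10003a … 0x100056: the three unchecked stores of the result, `prog_exit: hlt` not yet executed
  u_walk hcode [hμ.vendor] until [L.exit] span [L.textLo, L.textHi] side (v_side)
  -- 0x100056: EXIT
  refine ReachVia.done ?_
  exact w_rip

/-- **The stub reaches `prog_exit`, for a program that does not read its image's data**: `Top.stub_reachesD` with `D := fun _ => True`. -/
theorem Top.stub_reaches {Lay : Layout} (hLay : Lay.hi = 0x1000000) {μ : Microarch} (hμ : UserX.MicroOK μ) {u₀ : State}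
    (hcode : HasCodeNat Lay u₀ L._start.entry Code.code__start.nat L._start.size)
    (R : Runtime) (hR : R.sym = Spec.rtSym R.sym.ctor) (globals : List Obj)
    (hoff : ∀ o, o ∈ globals → T.hi ≤ o.base) (hglobals_lo : ∀ o, o ∈ globals → o.base + o.size ≤ 0x800000)
    (htable : 0x100000 ≤ R.table ∧ R.table + 64 * R.descs.length ≤ 0x700000)
    (s : Nat → Spec) (hframe : ∀ len, (s len).frame ≤ 0xFFFF8)
    (hpre : ∀ len v, Top.MainPre globals len v → (s len).pre v)
    (h_run_ctors : Calls Lay μ WayInv (conv u₀) L.run_ctors.entry (runCtorsSpec R))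
    (h_main : ∀ len, Calls Lay μ WayInv (conv u₀) L.prog_main.entry (s len)) :
    Top.StubReaches T L.exit R L._start.entry globals Lay μ u₀ := by
  intro len u hst hco
  exact Top.stub_reachesD hLay hμ hcode R hR globals hoff hglobals_lo htable (fun _ => True) (fun _ _ _ _ => True.intro)
    s hframe (fun len v h _ => hpre len v h) h_run_ctors h_main len u hst True.intro hco

end ProgX.Base
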